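-- pv_equiv track=rewrite | github.com/Wolleaf/CS61A-Summer2022 | hw/hw04/hw04.py | remove_odd_indices
-- ===== SOURCE A (Python) =====
-- def remove_odd_indices(lst, odd):
--     """Remove elements of lst that have odd indices. Use recursion!
--
--     >>> s = [1, 2, 3, 4]
--     >>> t = remove_odd_indices(s, True)
--     >>> s
--     [1, 2, 3, 4]
--     >>> t
--     [1, 3]
--     >>> l = [5, 6, 7, 8]
--     >>> m = remove_odd_indices(l, False)
--     >>> m
--     [6, 8]
--     >>> remove_odd_indices([9, 8, 7, 6, 5, 4, 3], False)
--     [8, 6, 4]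
--     >>> remove_odd_indices([2], False)
--     []
--     >>> # Do not use while/for loops!
--     >>> from construct_check import check
--     >>> # ban iteration
--     >>> check(HW_SOURCE_FILE, 'remove_odd_indices',
--     ...       ['While', 'For'])
--     True
--     """
--     "*** YOUR CODE HERE ***"
--     if not lst:
--         return []
--     if odd:
--         return [lst[0]] + remove_odd_indices(lst[1:], not odd)
--     else:
--         return remove_odd_indices(lst[1:], not odd)
-- ===== SOURCE B (Python) =====
-- def remove_odd_indices(lst, odd):
--     res = []
--     for i in range(len(lst)):
--         if (i % 2 == 0) == odd:
--             res.append(lst[i])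
--     return res
-- ===== Notes on version B (the rewrite author's own statement) =====
-- stated objective: alternative
-- what changed: replaces the recursion that slices the list and flips the parity flag with a single iterative index loop appending lst[i] when i's parity matches odd
import Mathlib
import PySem

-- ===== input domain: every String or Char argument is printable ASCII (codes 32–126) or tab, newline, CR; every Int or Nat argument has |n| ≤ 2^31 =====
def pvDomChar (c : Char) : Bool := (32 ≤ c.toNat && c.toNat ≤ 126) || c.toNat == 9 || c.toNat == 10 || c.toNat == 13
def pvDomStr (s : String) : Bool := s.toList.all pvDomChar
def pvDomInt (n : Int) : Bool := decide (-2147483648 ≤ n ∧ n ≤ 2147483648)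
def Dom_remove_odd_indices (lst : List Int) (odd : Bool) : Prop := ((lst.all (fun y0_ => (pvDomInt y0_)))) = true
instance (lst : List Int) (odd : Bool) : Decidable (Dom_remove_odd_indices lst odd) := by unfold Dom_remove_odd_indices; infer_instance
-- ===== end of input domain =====

-- B replaces A's parity-flipping recursion over list slices by one iterative index loop with an accumulator (alternative decomposition; equal return value proved below).


-- ===== PORT A =====
-- A: if lst is empty return []; if odd, keep lst[0] and recurse on lst[1:] with the flag flipped, else just recurse.
def remove_odd_indices : List Int → Bool → List Int
  | [], _ => []
  | x :: rest, odd =>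
      if odd then x :: remove_odd_indices rest (!odd)
      else remove_odd_indices rest (!odd)

-- ===== PORT B =====
-- B: res = []; for i in range(len(lst)): if (i % 2 == 0) == odd: res.append(lst[i]); return res
def remove_odd_indices_alt (lst : List Int) (odd : Bool) : List Int :=
  (PySem.List.pyRange 0 lst.length 1).foldl
    (fun res i => if (i % 2 == 0) == odd then res ++ [PySem.List.pyGetD lst i 0] else res) []

-- ===== PRECONDITION & SPEC =====
def Spec_remove_odd_indices (lst : List Int) (odd : Bool) (out : List Int) : Prop := out = remove_odd_indices_alt lst odd
instance (lst : List Int) (odd : Bool) (out : List Int) : Decidable (Spec_remove_odd_indices lst odd out) := by unfold Spec_remove_odd_indices; infer_instance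

-- ===== CLAIM (what is proved, stated in full; the proofs are below) =====
def Claim_equal_remove_odd_indices : Prop := ∀ (lst : List Int) (odd : Bool), Dom_remove_odd_indices lst odd → Spec_remove_odd_indices lst odd (remove_odd_indices lst odd)

-- ===== LEMMAS AND PROOFS =====

lemma pv_par (i : Nat) (odd : Bool) :
    ((((i : Int) + 1) % 2 == 0) == odd) = ((((i : Int)) % 2 == 0) == !odd) := by
  rcases Int.emod_two_eq (i : Int) with h | h
  · have h2 : ((i : Int) + 1) % 2 = 1 := by omega
    rw [h, h2]; cases odd <;> decide
  · have h2 : ((i : Int) + 1) % 2 = 0 := by omega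
    rw [h, h2]; cases odd <;> decide

lemma pv_loop_eq : ∀ (lst : List Int) (odd : Bool) (acc : List Int),
    (List.range lst.length).foldl
      (fun res (i : Nat) => if (((i : Int)) % 2 == 0) == odd then res ++ [lst.getD i 0] else res) acc
    = acc ++ remove_odd_indices lst odd := by
  intro lst
  induction lst with
  | nil => intro odd acc; simp [remove_odd_indices]
  | cons x xs ih =>
    intro odd acc
    have hf : (fun (res : List Int) (i : Nat) =>
        if (((((i : Nat) + 1 : Nat)) : Int) % 2 == 0) == odd then res ++ [(x :: xs).getD (i + 1) 0] else res)
        = (fun (res : List Int) (i : Nat) =>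
        if (((i : Int)) % 2 == 0) == !odd then res ++ [xs.getD i 0] else res) := by
      funext res i
      have : ((((i : Nat) + 1 : Nat)) : Int) = (i : Int) + 1 := by push_cast; ring
      rw [this, pv_par, List.getD_cons_succ]
    simp only [List.length_cons, List.range_succ_eq_map, List.foldl_cons, List.foldl_map]
    rw [hf, ih (!odd)]
    cases odd <;> simp [remove_odd_indices]

-- ===== VERDICT (by name: the statement is the Claim_ definition above) =====
theorem remove_odd_indices_spec : Claim_equal_remove_odd_indices := by
  intro lst odd _
  unfold Spec_remove_odd_indices remove_odd_indices_alt
  rw [PySem.List.pyRange_zero_nat, List.foldl_map]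
  rw [show (fun (res : List Int) (i : Nat) =>
      if ((i : Int) % 2 == 0) == odd then res ++ [PySem.List.pyGetD lst (i : Int) 0] else res)
    = (fun (res : List Int) (i : Nat) =>
      if ((i : Int) % 2 == 0) == odd then res ++ [lst.getD i 0] else res) from by
      funext res i; rw [PySem.List.pyGetD_natCast]]
  rw [pv_loop_eq]
  simp
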